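-- pv_equiv track=rewrite | github.com/akakaklolo/learn_python | 50.py | tinh_diem
-- ===== SOURCE A (Python) =====
-- def tinh_diem(n):
--     diem = 0
--     phat_trung = 0
--     phat_bo_loi = 14
--
--     for i in range(1, n + 1):
--         if i == phat_bo_loi:
--             phat_trung =0
--
--             phat_bo_loi =+15
--
--         if phat_trung > 9 :
--             diem += 1
--         else:
--             diem += 2
--
--         phat_trung += 1
--
--     return diem
-- ===== SOURCE B (Python) =====
-- def tinh_diem(n):
--     # Closed-form piecewise formula: score is 2/point until the counter passes 9,
--     # with resets at i=14 and i=15 (the `=+15` typo makes 15 the only later trigger).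
--     if n <= 0:
--         return 0
--     if n <= 10:
--         return 2 * n
--     if n <= 13:
--         return n + 10
--     if n <= 24:
--         return 2 * n - 3
--     return n + 21
-- ===== Notes on version B (the rewrite author's own statement) =====
-- stated objective: faster
-- what changed: Replaced the O(n) simulation loop with a closed-form piecewise arithmetic formula over the five regions determined by the two reset points i=14,15.
import Mathlib
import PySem

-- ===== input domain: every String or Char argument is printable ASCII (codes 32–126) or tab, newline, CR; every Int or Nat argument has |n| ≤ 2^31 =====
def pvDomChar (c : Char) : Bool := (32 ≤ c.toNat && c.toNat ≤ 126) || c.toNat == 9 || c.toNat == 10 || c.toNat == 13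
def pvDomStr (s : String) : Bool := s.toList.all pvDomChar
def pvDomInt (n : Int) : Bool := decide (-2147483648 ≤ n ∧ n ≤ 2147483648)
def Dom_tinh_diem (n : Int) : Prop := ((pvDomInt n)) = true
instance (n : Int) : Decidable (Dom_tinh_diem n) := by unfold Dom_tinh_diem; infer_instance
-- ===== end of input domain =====

-- B replaces A's O(n) simulation loop by a closed-form piecewise formula (O(1)).

-- ===== PORT A =====
-- one loop iteration of A: state = (diem, phat_trung, phat_bo_loi)
def pvStep (st : Int × Int × Int) (i : Int) : Int × Int × Int :=
  let pt' := if i = st.2.2 then 0 else st.2.1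
  let bl' := if i = st.2.2 then 15 else st.2.2          -- `phat_bo_loi =+15` assigns +15
  let diem' := if pt' > 9 then st.1 + 1 else st.1 + 2
  (diem', pt' + 1, bl')

def tinh_diem (n : Int) : Int :=
  ((PySem.List.pyRange 1 (n + 1) 1).foldl pvStep (0, 0, 14)).1

-- ===== PORT B =====
def tinh_diem_alt (n : Int) : Int :=
  if n ≤ 0 then 0
  else if n ≤ 10 then 2 * n
  else if n ≤ 13 then n + 10
  else if n ≤ 24 then 2 * n - 3
  else n + 21

-- ===== PRECONDITION & SPEC =====
def Spec_tinh_diem (n : Int) (out : Int) : Prop := out = tinh_diem_alt n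
instance (n : Int) (out : Int) : Decidable (Spec_tinh_diem n out) := by unfold Spec_tinh_diem; infer_instance

-- ===== CLAIM (what is proved, stated in full; the proofs are below) =====
def Claim_equal_tinh_diem : Prop := ∀ (n : Int), Dom_tinh_diem n → Spec_tinh_diem n (tinh_diem n)

-- ===== LEMMAS AND PROOFS =====

-- full characterisation of A's loop state after processing i = 1..k
set_option maxHeartbeats 1600000 in
theorem pv_loop_char (k : Nat) :
    (PySem.List.pyRange 1 ((k : Int) + 1) 1).foldl pvStep (0, 0, 14) =
      (tinh_diem_alt (k : Int),
       if (k : Int) ≤ 13 then (k : Int) else if (k : Int) = 14 then 1 else (k : Int) - 14,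
       if (k : Int) ≤ 13 then 14 else 15) := by
  induction k with
  | zero =>
      rw [PySem.List.pyRange_one_eq_nil (by norm_num)]
      simp [tinh_diem_alt]
  | succ k ih =>
      have h : ((k + 1 : Nat) : Int) + 1 = ((k : Int) + 1) + 1 := by push_cast; ring
      rw [h, PySem.List.pyRange_one_succ_right (by omega), List.foldl_append,
          List.foldl_cons, List.foldl_nil, ih]
      simp only [pvStep, tinh_diem_alt, Prod.mk.injEq]
      push_cast
      split_ifs <;> omega

theorem tinh_diem_spec : Claim_equal_tinh_diem := by
  intro n _
  unfold Spec_tinh_diem tinh_diem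
  by_cases hle : n ≤ 0
  · rw [PySem.List.pyRange_one_eq_nil (by omega)]
    simp [tinh_diem_alt, hle]
  · have hn : n = ((n.toNat : Nat) : Int) := by omega
    rw [hn, pv_loop_char]
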